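-- pv_equiv track=rewrite | github.com/aiup621/matcha-finder | update_contact_info_api.py | _adjust_written_rows_after_deletion
-- ===== SOURCE A (Python) =====
-- import bisect
-- from typing import Any, List, Optional, Sequence
--
-- def _adjust_written_rows_after_deletion(
--     written_rows: Sequence[int], deleted_rows: Sequence[int]
-- ) -> List[int]:
--     """Return ``written_rows`` adjusted after removing ``deleted_rows``."""
--
--     if not deleted_rows:
--         return list(written_rows)
--
--     deleted_sorted = sorted({int(row) for row in deleted_rows})
--     deleted_set = set(deleted_sorted)
--     adjusted: List[int] = []
--
--     for row in written_rows:
--         if row in deleted_set: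
--             continue
--         shift = bisect.bisect_left(deleted_sorted, row)
--         adjusted.append(row - shift)
--
--     return adjusted
-- ===== SOURCE B (Python) =====
-- from typing import List, Sequence
--
--
-- def _adjust_written_rows_after_deletion(
--     written_rows: Sequence[int], deleted_rows: Sequence[int]
-- ) -> List[int]:
--     """Return ``written_rows`` adjusted after removing ``deleted_rows``.
--
--     Single merge pass: walk the written rows in sorted order with one moving
--     pointer into the sorted deleted rows, then restore the original order.
--     """
--     deleted_sorted = sorted(set(deleted_rows))
--     by_value = sorted(enumerate(written_rows), key=lambda p: p[1])
--     kept = []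
--     j = 0
--     for idx, row in by_value:
--         while j < len(deleted_sorted) and deleted_sorted[j] < row:
--             j += 1
--         if j < len(deleted_sorted) and deleted_sorted[j] == row:
--             continue
--         kept.append((idx, row - j))
--     kept.sort(key=lambda p: p[0])
--     return [row for _, row in kept]
-- ===== Notes on version B (the rewrite author's own statement) =====
-- stated objective: alternative
-- what changed: Replaces A's per-row set-membership test plus bisect_left binary search with a single merge pass: written rows are sorted together with their original indices and walked against the sorted deleted rows with one moving pointer that doubles as the shift counter, after which the kept pairs are re-sorted by original index to restore input order.
import Mathlib
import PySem

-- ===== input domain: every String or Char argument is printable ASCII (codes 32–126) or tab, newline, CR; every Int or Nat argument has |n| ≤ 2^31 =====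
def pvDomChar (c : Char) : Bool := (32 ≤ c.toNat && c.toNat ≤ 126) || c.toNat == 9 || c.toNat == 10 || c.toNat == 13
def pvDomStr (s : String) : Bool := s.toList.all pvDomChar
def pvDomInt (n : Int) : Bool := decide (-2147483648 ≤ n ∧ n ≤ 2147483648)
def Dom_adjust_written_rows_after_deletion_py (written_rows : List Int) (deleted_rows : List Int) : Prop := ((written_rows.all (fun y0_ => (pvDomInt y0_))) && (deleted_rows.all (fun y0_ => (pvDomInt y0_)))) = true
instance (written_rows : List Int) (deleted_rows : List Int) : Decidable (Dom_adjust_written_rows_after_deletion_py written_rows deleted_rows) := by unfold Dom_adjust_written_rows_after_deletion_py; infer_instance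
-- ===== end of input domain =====

-- ===== PORT A =====
-- B replaces A's per-row set lookup + bisect with a single sorted merge pass (objective: alternative; same asymptotic cost).
def adjust_written_rows_after_deletion_py (written_rows : List Int) (deleted_rows : List Int) : List Int :=
  if deleted_rows = [] then written_rows
  else
    let deleted_sorted : List Int := PySem.List.sorted (PySem.Set.ofList deleted_rows) (fun x => x)
    let deleted_set : PySem.Set Int := PySem.Set.ofList deleted_sorted
    written_rows.foldl (fun adjusted row =>
      if row ∈ deleted_set then adjusted
      else adjusted ++ [row - (PySem.List.bisectLeft deleted_sorted row : Int)]) []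

-- ===== PORT B =====
-- the merge loop of Source B: pw = remaining written (index, row) pairs sorted by row,
-- ds = the not-yet-passed suffix of deleted_sorted, j = how many deleted values the pointer has passed
def pvMergeB : List (Int × Int) → List Int → Nat → List (Int × Int)
  | [], _, _ => []
  | (i, r) :: pw, d :: ds, j =>
      if d < r then pvMergeB ((i, r) :: pw) ds (j + 1)         -- while-loop step: advance the pointer
      else if d = r then pvMergeB pw (d :: ds) j               -- row is deleted: skip
      else (i, r - (j : Int)) :: pvMergeB pw (d :: ds) j       -- keep (idx, row - j)
  | (i, r) :: pw, [], j => (i, r - (j : Int)) :: pvMergeB pw [] j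
  termination_by pw ds _ => pw.length + ds.length

def adjust_written_rows_after_deletion_py_alt (written_rows : List Int) (deleted_rows : List Int) : List Int :=
  let deleted_sorted : List Int := PySem.List.sorted (PySem.Set.ofList deleted_rows) (fun x => x)
  let by_value := PySem.List.sorted (PySem.List.enumerate written_rows) (fun p => p.2)
  let kept := pvMergeB by_value deleted_sorted 0
  (PySem.List.sorted kept (fun p => p.1)).map (fun p => p.2)

-- ===== PRECONDITION & SPEC =====
def Spec_adjust_written_rows_after_deletion_py (written_rows : List Int) (deleted_rows : List Int) (out : List Int) : Prop := out = adjust_written_rows_after_deletion_py_alt written_rows deleted_rows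
instance (written_rows : List Int) (deleted_rows : List Int) (out : List Int) : Decidable (Spec_adjust_written_rows_after_deletion_py written_rows deleted_rows out) := by unfold Spec_adjust_written_rows_after_deletion_py; infer_instance

-- ===== CLAIM (what is proved, stated in full; the proofs are below) =====
def Claim_equal_adjust_written_rows_after_deletion_py : Prop := ∀ (written_rows : List Int) (deleted_rows : List Int), Dom_adjust_written_rows_after_deletion_py written_rows deleted_rows → Spec_adjust_written_rows_after_deletion_py written_rows deleted_rows (adjust_written_rows_after_deletion_py written_rows deleted_rows)

-- ===== LEMMAS AND PROOFS =====

-- On a strictly sorted list, bisect_left counts the elements below x.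
theorem pv_bisectLeft_eq_countP (ds : List Int) (x : Int)
    (h : ds.Pairwise (· ≤ ·)) :
    PySem.List.bisectLeft ds x = ds.countP (fun d => decide (d < x)) := by
  obtain ⟨hle, hlt, hge⟩ := PySem.List.bisectLeft_spec ds x h
  set k := PySem.List.bisectLeft ds x with hk
  have hsplit : ds = ds.take k ++ ds.drop k := (List.take_append_drop k ds).symm
  rw [hsplit, List.countP_append]
  have h1 : (ds.take k).countP (fun d => decide (d < x)) = (ds.take k).length := by
    rw [List.countP_eq_length]
    intro a ha
    obtain ⟨i, hi, rfl⟩ := List.mem_iff_getElem.mp ha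
    have hi' : i < ds.length := lt_of_lt_of_le (lt_of_lt_of_le hi (by simp)) (le_refl _)
    have hik : i < k := by
      have := hi; simp only [List.length_take] at this; omega
    have hi'' : i < ds.length := by omega
    rw [List.getElem_take]
    exact decide_eq_true (hlt i hi'' hik)
  have h2 : (ds.drop k).countP (fun d => decide (d < x)) = 0 := by
    rw [List.countP_eq_zero]
    intro a ha
    obtain ⟨i, hi, rfl⟩ := List.mem_iff_getElem.mp ha
    rw [List.getElem_drop]
    have hki : k + i < ds.length := by simp only [List.length_drop] at hi; omega
    have := hge (k + i) hki (Nat.le_add_right k i)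
    simp only [decide_eq_true_eq]
    omega
  rw [h1, h2, List.length_take]
  omega

-- Characterisation of the merge pass: with ds strictly increasing and pw nondecreasing
-- in the row component, the walk keeps exactly the non-deleted pairs, shifted by j plus
-- the number of remaining deleted values below the row.
theorem pvMergeB_eq (pw : List (Int × Int)) (ds : List Int) (j : Nat)
    (hds : ds.Pairwise (· < ·)) (hpw : pw.Pairwise (fun a b => a.2 ≤ b.2)) :
    pvMergeB pw ds j = pw.filterMap (fun p =>
      if p.2 ∈ ds then none
      else some (p.1, p.2 - ((j + ds.countP (fun d => decide (d < p.2)) : Nat) : Int))) := by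
  induction pw, ds, j using pvMergeB.induct with
  | case1 ds j => simp [pvMergeB]
  | case2 i r pw d ds j hdr ih =>
    rw [pvMergeB, if_pos hdr]
    rw [ih (hds.sublist (List.sublist_cons_self d ds)) hpw]
    apply (List.filterMap_congr _).symm
    intro p hp
    have hrp : r ≤ p.2 := by
      rcases hp with _ | hp
      · exact le_refl _
      · exact (List.pairwise_cons.mp hpw).1 p (by assumption)
    have hdp : d < p.2 := lt_of_lt_of_le hdr hrp
    have hmem : (p.2 ∈ d :: ds) ↔ (p.2 ∈ ds) := by
      constructor
      · rintro (_ | h); · omega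
        · assumption
      · exact fun h => List.mem_cons_of_mem d h
    have hcnt : (d :: ds).countP (fun x => decide (x < p.2))
        = ds.countP (fun x => decide (x < p.2)) + 1 := by
      rw [List.countP_cons]
      simp [hdp]
    by_cases hin : p.2 ∈ ds
    · rw [if_pos (hmem.mpr hin), if_pos hin]
    · rw [if_neg (fun h => hin (hmem.mp h)), if_neg hin, hcnt]
      congr 2
      omega
  | case3 i pw d ds j hdd ih =>
    rw [pvMergeB, if_neg hdd, if_pos rfl]
    rw [ih hds hpw.of_cons]
    rw [List.filterMap_cons]
    simp
  | case4 i r pw d ds j hdr hde ih =>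
    rw [pvMergeB, if_neg hdr, if_neg hde]
    have hrd : r < d := by omega
    have hall : ∀ x ∈ d :: ds, ¬ x < r := by
      intro x hx
      rcases List.mem_cons.mp hx with h | h
      · omega
      · have := (List.pairwise_cons.mp hds).1 x h
        omega
    have hnm : r ∉ d :: ds := by
      intro h
      rcases List.mem_cons.mp h with h | h
      · exact hde h.symm
      · have := (List.pairwise_cons.mp hds).1 r h
        omega
    have hcnt0 : (d :: ds).countP (fun x => decide (x < r)) = 0 := by
      rw [List.countP_eq_zero]
      intro x hx
      simpa using hall x hx
    rw [ih hds hpw.of_cons]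
    rw [List.filterMap_cons, if_neg hnm, hcnt0]
    simp
  | case5 i r pw j ih =>
    rw [pvMergeB, ih (by constructor) hpw.of_cons]
    rw [List.filterMap_cons]
    simp

-- Dropping the indices from the filtered enumeration gives a plain filterMap over the rows.
theorem pv_map_snd_filterMap_enumerate (xs : List Int) (s : Int) (g : Int → Option Int) :
    ((PySem.List.enumerate xs s).filterMap (fun p => (g p.2).map (fun v => (p.1, v)))).map (fun p => p.2)
      = xs.filterMap g := by
  induction xs generalizing s with
  | nil => simp [PySem.List.enumerate_nil]
  | cons x xs ih =>
    rw [PySem.List.enumerate_cons, List.filterMap_cons, List.filterMap_cons]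
    cases hg : g x with
    | none => simpa using ih (s + 1)
    | some v => simp [ih (s + 1)]

-- B computes a filterMap over the written rows, against D = sorted(set(deleted)).
theorem pv_alt_eq_filterMap (written_rows deleted_rows : List Int) :
    adjust_written_rows_after_deletion_py_alt written_rows deleted_rows
      = written_rows.filterMap (fun r =>
          if r ∈ PySem.List.sorted (PySem.Set.ofList deleted_rows) (fun x => x) then none
          else some (r - ((PySem.List.sorted (PySem.Set.ofList deleted_rows) (fun x => x)).countP
                  (fun d => decide (d < r)) : Int))) := by
  unfold adjust_written_rows_after_deletion_py_alt
  set ds := PySem.List.sorted (PySem.Set.ofList deleted_rows) (fun x => x) with hdsdef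
  have hds : ds.Pairwise (· < ·) := PySem.List.sorted_ofList_pairwise_lt deleted_rows
  set F : Int × Int → Option (Int × Int) := fun p =>
    if p.2 ∈ ds then none
    else some (p.1, p.2 - ((0 + ds.countP (fun d => decide (d < p.2)) : Nat) : Int)) with hF
  have hmerge : pvMergeB (PySem.List.sorted (PySem.List.enumerate written_rows) (fun p => p.2)) ds 0
      = (PySem.List.sorted (PySem.List.enumerate written_rows) (fun p => p.2)).filterMap F :=
    pvMergeB_eq _ ds 0 hds (PySem.List.sorted_pairwise _ _)
  have hperm : ((PySem.List.sorted (PySem.List.enumerate written_rows) (fun p => p.2)).filterMap F).Perm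
      ((PySem.List.enumerate written_rows).filterMap F) :=
    (PySem.List.sorted_perm _ _ _).filterMap F
  have hLpair : ((PySem.List.enumerate written_rows).filterMap F).Pairwise (fun a b => a.1 < b.1) := by
    refine List.Pairwise.filterMap F ?_ (PySem.List.pairwise_lt_enumerate written_rows 0)
    intro a a' h b hb b' hb'
    have hb1 : b.1 = a.1 := by
      by_cases hm : a.2 ∈ ds
      · simp [hF, hm] at hb
      · simp [hF, hm] at hb; simp [← hb]
    have hb1' : b'.1 = a'.1 := by
      by_cases hm : a'.2 ∈ ds
      · simp [hF, hm] at hb'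
      · simp [hF, hm] at hb'; simp [← hb']
    rw [hb1, hb1']; exact h
  have hsorted : PySem.List.sorted (pvMergeB (PySem.List.sorted (PySem.List.enumerate written_rows) (fun p => p.2)) ds 0) (fun p => p.1)
      = (PySem.List.enumerate written_rows).filterMap F := by
    rw [hmerge]
    exact PySem.List.sorted_eq_of_perm_of_pairwise_lt _ _ _ hperm.symm hLpair
  simp only at hsorted ⊢
  rw [hsorted]
  have hFg : F = fun p => ((fun r => if r ∈ ds then none
        else some (r - (ds.countP (fun d => decide (d < r)) : Int))) p.2).map (fun v => (p.1, v)) := by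
    funext p
    by_cases hm : p.2 ∈ ds
    · simp [hF, hm]
    · simp [hF, hm]
  rw [hFg, pv_map_snd_filterMap_enumerate written_rows 0 (fun r => if r ∈ ds then none
        else some (r - (ds.countP (fun d => decide (d < r)) : Int)))]

-- ===== VERDICT (by name: the statement is the Claim_ definition above) =====
theorem adjust_written_rows_after_deletion_py_spec : Claim_equal_adjust_written_rows_after_deletion_py := by
  intro written_rows deleted_rows _
  unfold Spec_adjust_written_rows_after_deletion_py
  rw [pv_alt_eq_filterMap]
  unfold adjust_written_rows_after_deletion_py
  by_cases hnil : deleted_rows = []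
  · subst hnil
    simp [PySem.Set.ofList, PySem.List.sorted]
  · rw [if_neg hnil]
    simp only
    set ds := PySem.List.sorted (PySem.Set.ofList deleted_rows) (fun x => x) with hdsdef
    have hds : ds.Pairwise (· < ·) := PySem.List.sorted_ofList_pairwise_lt deleted_rows
    have hdsle : ds.Pairwise (· ≤ ·) := hds.imp (fun h => le_of_lt h)
    rw [show (fun (adjusted : List Int) (row : Int) =>
          if row ∈ PySem.Set.ofList ds then adjusted
          else adjusted ++ [row - (PySem.List.bisectLeft ds row : Int)])
        = (fun adjusted row =>
          if row ∉ PySem.Set.ofList ds then adjusted ++ [row - (PySem.List.bisectLeft ds row : Int)]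
          else adjusted) from by funext acc row; by_cases h : row ∈ PySem.Set.ofList ds <;> simp [h]]
    rw [PySem.List.foldl_append_ite (p := fun row => row ∉ PySem.Set.ofList ds)]
    rw [List.nil_append, ← List.filterMap_eq_map, List.filterMap_filter]
    apply List.filterMap_congr
    intro r _
    by_cases hm : r ∈ ds
    · simp [PySem.Set.mem_ofList, hm]
    · simp [PySem.Set.mem_ofList, hm, pv_bisectLeft_eq_countP ds r hdsle]
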